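-- pv_equiv track=rewrite | github.com/chris-leonard/censor_dispenser | censor_dispenser_alt.py | strip_end_punctuation
-- ===== SOURCE A (Python) =====
-- import string
--
-- def strip_end_punctuation(str):
--     'Returns slice of string up to last (alphabetical) letter'
--     last_letter_index = len(str)-1
--     while last_letter_index >= 0:
--         if str[last_letter_index] not in string.ascii_letters:
--             last_letter_index -= 1
--         else:
--             break
--
--     return str[:last_letter_index+1]
-- ===== SOURCE B (Python) =====
-- import string
--
-- def strip_end_punctuation(str):
--     'Returns slice of string up to last (alphabetical) letter'
--     letters = set(string.ascii_letters)
--     end = 0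
--     for i, ch in enumerate(str):
--         if ch in letters:
--             end = i + 1
--     return str[:end]
-- ===== Notes on version B (the rewrite author's own statement) =====
-- stated objective: alternative
-- what changed: Replaces A's backward while-loop (decrementing an index from the end until a letter is found, with an early break) by a single forward enumerate pass that maintains `end`, the position just past the last letter seen, then slices to it.
import Mathlib
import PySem

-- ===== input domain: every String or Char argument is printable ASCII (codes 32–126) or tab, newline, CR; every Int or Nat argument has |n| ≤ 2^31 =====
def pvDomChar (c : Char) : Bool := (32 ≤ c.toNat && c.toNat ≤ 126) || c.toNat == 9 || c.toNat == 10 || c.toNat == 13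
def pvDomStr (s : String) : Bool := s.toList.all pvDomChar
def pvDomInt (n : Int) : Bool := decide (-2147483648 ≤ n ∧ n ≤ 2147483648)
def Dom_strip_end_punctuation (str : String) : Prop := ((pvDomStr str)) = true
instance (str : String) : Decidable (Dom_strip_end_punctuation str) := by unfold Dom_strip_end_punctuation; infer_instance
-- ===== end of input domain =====

-- B replaces A's backward scan-with-break by a forward enumerate pass maintaining `end`; alternative decomposition, same cost.

-- membership in string.ascii_letters (exact: ascii_letters = a-z ++ A-Z)
def pvIsAsciiLetter (c : Char) : Bool := ('a' ≤ c && c ≤ 'z') || ('A' ≤ c && c ≤ 'Z')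

-- ===== PORT A =====
-- A's while-loop: i counts down from len-1 until str[i] is a letter (or i < 0); recursion on k = i+1.
def pvStripLoopA (cs : List Char) : Nat → Nat
  | 0 => 0
  | k + 1 => if pvIsAsciiLetter (cs.getD k ' ') then k + 1 else pvStripLoopA cs k

def strip_end_punctuation (str : String) : String :=
  -- str[:last_letter_index+1] with a nonnegative bound = take
  String.mk (str.toList.take (pvStripLoopA str.toList str.toList.length))

-- ===== PORT B =====
def strip_end_punctuation_alt (str : String) : String :=
  let e : Int := (PySem.List.enumerate str.toList 0).foldl
    (fun e p => if pvIsAsciiLetter p.2 then p.1 + 1 else e) 0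
  String.mk (str.toList.take e.toNat)

-- ===== PRECONDITION & SPEC =====
def Spec_strip_end_punctuation (str : String) (out : String) : Prop := out = strip_end_punctuation_alt str
instance (str : String) (out : String) : Decidable (Spec_strip_end_punctuation str out) := by unfold Spec_strip_end_punctuation; infer_instance

-- ===== CLAIM (what is proved, stated in full; the proofs are below) =====
def Claim_equal_strip_end_punctuation : Prop := ∀ (str : String), Dom_strip_end_punctuation str → Spec_strip_end_punctuation str (strip_end_punctuation str)

-- ===== LEMMAS AND PROOFS =====

def pvFoldB (cs : List Char) : Int :=
  (PySem.List.enumerate cs 0).foldl (fun e p => if pvIsAsciiLetter p.2 then p.1 + 1 else e) 0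

lemma pvLoop_eq_fold (cs : List Char) : ∀ k, k ≤ cs.length →
    (pvStripLoopA cs k : Int) = pvFoldB (cs.take k) := by
  intro k
  induction k with
  | zero => intro _; simp [pvStripLoopA, pvFoldB, PySem.List.enumerate_nil]
  | succ k ih =>
    intro hk
    have hlt : k < cs.length := by omega
    have htake : cs.take (k + 1) = cs.take k ++ [cs[k]] := by
      rw [List.take_add_one, List.getElem?_eq_getElem hlt]; rfl
    have hgetD : cs.getD k ' ' = cs[k] := by
      simp [List.getD, List.getElem?_eq_getElem hlt]
    have hfold : pvFoldB (cs.take (k + 1)) =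
        (if pvIsAsciiLetter cs[k] then ((cs.take k).length : Int) + 0 + 1
         else pvFoldB (cs.take k)) := by
      rw [pvFoldB, htake, PySem.List.enumerate_append]
      simp [PySem.List.enumerate_cons, PySem.List.enumerate_nil, pvFoldB, add_comm]
    rw [hfold]
    have hlen : (cs.take k).length = k := by simp [List.length_take]; omega
    rw [pvStripLoopA, hgetD]
    by_cases h : pvIsAsciiLetter cs[k]
    · simp [h, hlen]
    · simp [h, ih (by omega)]

-- ===== VERDICT (by name: the statement is the Claim_ definition above) =====
theorem strip_end_punctuation_spec : Claim_equal_strip_end_punctuation := by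
  intro str _
  unfold Spec_strip_end_punctuation strip_end_punctuation strip_end_punctuation_alt
  have h := pvLoop_eq_fold str.toList str.toList.length le_rfl
  simp only [List.take_length] at h
  have : pvStripLoopA str.toList str.toList.length = (pvFoldB str.toList).toNat := by
    rw [← h]; simp
  rw [this]; rfl
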